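-- pv_equiv track=rewrite | github.com/rit-swenms-gang/mupp | src/db/MatchingAlgorithms.py | check_valid_gene
-- ===== SOURCE A (Python) =====
-- def check_valid_gene(gene):
--   found = []
--   for schedule in gene.values():
--     for round in schedule:
--       for player in round:
--         if ((player in found)):
--           return(False)
--         else:
--           found.append(player)
--
--   return(True)
-- ===== SOURCE B (Python) =====
-- def check_valid_gene(gene):
--   players = [p for schedule in gene.values() for round in schedule for p in round]
--   return len(players) == len(set(players))
-- ===== Notes on version B (the rewrite author's own statement) =====
-- stated objective: simpler
-- what changed: Replaces the triple nested loop with a running 'found' list and early False return by flattening all players once and comparing the list's length with its deduplicated size.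
import Mathlib
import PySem

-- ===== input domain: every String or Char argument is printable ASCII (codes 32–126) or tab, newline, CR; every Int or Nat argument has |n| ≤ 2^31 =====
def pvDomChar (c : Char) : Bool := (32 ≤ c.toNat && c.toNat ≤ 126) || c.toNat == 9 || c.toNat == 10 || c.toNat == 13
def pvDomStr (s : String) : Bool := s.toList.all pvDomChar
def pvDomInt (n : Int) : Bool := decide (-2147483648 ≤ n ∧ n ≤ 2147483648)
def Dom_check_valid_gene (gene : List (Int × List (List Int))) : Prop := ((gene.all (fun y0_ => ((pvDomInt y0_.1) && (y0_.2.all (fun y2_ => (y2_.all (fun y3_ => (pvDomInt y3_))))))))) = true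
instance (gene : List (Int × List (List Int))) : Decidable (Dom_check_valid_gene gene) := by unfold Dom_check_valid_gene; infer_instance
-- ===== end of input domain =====

-- B flattens all players once and compares the count with the deduplicated count,
-- instead of A's nested loops with a running 'found' list and early False return.

-- ===== PORT A =====
-- inner loop: 'for player in round', with the running 'found' list; none = early 'return False'
def cvgRound (found : List Int) (round : List Int) : Option (List Int) :=
  match round with
  | [] => some found
  | p :: ps => if found.contains p then none else cvgRound (found ++ [p]) ps

-- middle loop: 'for round in schedule'
def cvgSchedule (found : List Int) (schedule : List (List Int)) : Option (List Int) :=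
  match schedule with
  | [] => some found
  | r :: rs =>
    match cvgRound found r with
    | none => none
    | some f => cvgSchedule f rs

-- outer loop: 'for schedule in gene.values()'
def cvgGene (found : List Int) (schedules : List (List (List Int))) : Option (List Int) :=
  match schedules with
  | [] => some found
  | s :: ss =>
    match cvgSchedule found s with
    | none => none
    | some f => cvgGene f ss

def check_valid_gene (gene : List (Int × List (List Int))) : Bool :=
  match cvgGene [] (gene.map (fun kv => kv.2)) with
  | none => false
  | some _ => true

-- ===== PORT B =====
def check_valid_gene_alt (gene : List (Int × List (List Int))) : Bool :=
  let players := (gene.map (fun kv => kv.2)).flatMap (fun schedule => schedule.flatMap (fun round => round))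
  players.length == (PySem.Set.ofList players).length

-- ===== PRECONDITION & SPEC =====
def Spec_check_valid_gene (gene : List (Int × List (List Int))) (out : Bool) : Prop := out = check_valid_gene_alt gene
instance (gene : List (Int × List (List Int))) (out : Bool) : Decidable (Spec_check_valid_gene gene out) := by unfold Spec_check_valid_gene; infer_instance

-- ===== CLAIM (what is proved, stated in full; the proofs are below) =====
def Claim_equal_check_valid_gene : Prop := ∀ (gene : List (Int × List (List Int))), Dom_check_valid_gene gene → Spec_check_valid_gene gene (check_valid_gene gene)

-- ===== LEMMAS AND PROOFS =====

theorem cvgRound_eq (round : List Int) : ∀ (found : List Int), found.Nodup →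
    cvgRound found round = if (found ++ round).Nodup then some (found ++ round) else none := by
  induction round with
  | nil => intro found h; simp [cvgRound, h]
  | cons p ps ih =>
    intro found h
    rw [cvgRound]
    by_cases hpm : p ∈ found
    · rw [if_pos (by simpa [List.contains_iff_mem] using hpm), if_neg]
      intro hn
      exact (List.disjoint_of_nodup_append hn) hpm (List.mem_cons_self ..)
    · have hnd : (found ++ [p]).Nodup := by
        simp [List.nodup_append, h]
        intro a ha hap; exact hpm (hap ▸ ha)
      rw [if_neg (by simpa [List.contains_iff_mem] using hpm), ih _ hnd]
      simp only [List.append_assoc, List.singleton_append]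

theorem cvgSchedule_eq (schedule : List (List Int)) : ∀ (found : List Int), found.Nodup →
    cvgSchedule found schedule =
      if (found ++ schedule.flatMap (fun round => round)).Nodup
      then some (found ++ schedule.flatMap (fun round => round)) else none := by
  induction schedule with
  | nil => intro found h; simp [cvgSchedule, h]
  | cons r rs ih =>
    intro found h
    rw [cvgSchedule, cvgRound_eq r found h]
    by_cases hr : (found ++ r).Nodup
    · rw [if_pos hr]
      show cvgSchedule (found ++ r) rs = _
      rw [ih _ hr]
      simp only [List.flatMap_cons, List.append_assoc]
    · rw [if_neg hr]
      show (none : Option (List Int)) = _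
      rw [if_neg]
      intro hn
      apply hr
      have hsub : r.Sublist ((r :: rs).flatMap (fun round => round)) := by
        rw [List.flatMap_cons]
        exact List.sublist_append_left _ _
      exact hn.sublist ((List.append_sublist_append_left found).mpr hsub)

theorem cvgGene_eq (schedules : List (List (List Int))) : ∀ (found : List Int), found.Nodup →
    cvgGene found schedules =
      if (found ++ schedules.flatMap (fun s => s.flatMap (fun round => round))).Nodup
      then some (found ++ schedules.flatMap (fun s => s.flatMap (fun round => round))) else none := by
  induction schedules with
  | nil => intro found h; simp [cvgGene, h]
  | cons s ss ih =>
    intro found h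
    rw [cvgGene, cvgSchedule_eq s found h]
    by_cases hs : (found ++ s.flatMap (fun round => round)).Nodup
    · rw [if_pos hs]
      show cvgGene (found ++ s.flatMap (fun round => round)) ss = _
      rw [ih _ hs]
      simp only [List.flatMap_cons, List.append_assoc]
    · rw [if_neg hs]
      show (none : Option (List Int)) = _
      rw [if_neg]
      intro hn
      apply hs
      have hsub : (s.flatMap (fun round => round)).Sublist
          ((s :: ss).flatMap (fun t => t.flatMap (fun round => round))) := by
        rw [List.flatMap_cons]
        exact List.sublist_append_left _ _
      exact hn.sublist ((List.append_sublist_append_left found).mpr hsub)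

-- set(xs) is the first occurrences of xs, in order — hence a sublist of xs
theorem foldl_add_sublist (xs : List Int) : ∀ (s : List Int),
    (xs.foldl PySem.Set.add s).Sublist (s ++ xs) := by
  induction xs with
  | nil => intro s; simp
  | cons x t ih =>
    intro s
    rw [List.foldl_cons]
    refine (ih (PySem.Set.add s x)).trans ?_
    by_cases hc : x ∈ s
    · rw [show PySem.Set.add s x = s from by simp [PySem.Set.add, hc]]
      exact (List.append_sublist_append_left s).mpr (List.sublist_cons_self x t)
    · rw [show PySem.Set.add s x = s ++ [x] from by simp [PySem.Set.add, hc]]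
      simp

-- on a duplicate-free list, building the set adds every element
theorem foldl_add_of_nodup (xs : List Int) : ∀ (s : List Int),
    (∀ x ∈ xs, x ∉ s) → xs.Nodup → xs.foldl PySem.Set.add s = s ++ xs := by
  induction xs with
  | nil => intro s _ _; simp
  | cons x t ih =>
    intro s hdisj hnd
    rw [List.foldl_cons,
        show PySem.Set.add s x = s ++ [x] from by
          simp [PySem.Set.add]
          exact hdisj x (List.mem_cons_self ..),
        ih (s ++ [x]) ?_ (List.nodup_cons.mp hnd).2]
    · simp
    · intro y hy
      simp only [List.mem_append, List.mem_singleton]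
      rintro (hys | rfl)
      · exact hdisj y (List.mem_cons_of_mem x hy) hys
      · exact (List.nodup_cons.mp hnd).1 hy

-- B's size comparison decides Nodup: len(set(xs)) == len(xs) ↔ xs.Nodup
theorem ofList_length_eq_iff (xs : List Int) :
    ((PySem.Set.ofList xs).length = xs.length) ↔ xs.Nodup := by
  constructor
  · intro h
    have hs : (PySem.Set.ofList xs).Sublist xs := by
      simpa using foldl_add_sublist xs []
    rw [← hs.eq_of_length h]
    exact PySem.Set.nodup_ofList xs
  · intro h
    have : PySem.Set.ofList xs = xs := by
      simpa using foldl_add_of_nodup xs [] (by simp) h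
    rw [this]

-- ===== VERDICT (by name: the statement is the Claim_ definition above) =====
theorem check_valid_gene_spec : Claim_equal_check_valid_gene := by
  intro gene _
  unfold Spec_check_valid_gene check_valid_gene check_valid_gene_alt
  rw [cvgGene_eq _ [] List.nodup_nil]
  simp only [List.nil_append]
  by_cases h : ((gene.map (fun kv => kv.2)).flatMap (fun s => s.flatMap (fun round => round))).Nodup
  · rw [if_pos h]
    exact (beq_iff_eq.mpr ((ofList_length_eq_iff _).mpr h).symm).symm
  · rw [if_neg h]
    symm
    rw [beq_eq_false_iff_ne]
    intro hlen
    exact h ((ofList_length_eq_iff _).mp hlen.symm)
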